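-- pv_equiv track=rewrite | github.com/ellismckenzielee/codewars-python | make_a_window.py | make_a_window
-- ===== SOURCE A (Python) =====
-- def make_a_window(num):
--     output = ''
--     for i in range(5):
--         if i in (0,4):
--             edge, middle, type = '-', '-', '-'
--             n = 1
--         elif i == 2:
--             edge, middle, type = '|', '+', '-'
--             n = 1
--         else:
--             edge, middle, type = '|', '|', '.'
--             n=num
--         output += (n*(edge + type*num + middle + type*num + edge +'\n'))
--     return output[:-1]
-- ===== SOURCE B (Python) =====
-- def make_a_window(num):
--     k = max(num, 0)
--     L = 2 * k + 3          # window is an L x L grid of characters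
--     m = k + 1              # centre row/column
--     W = L + 1              # row width on the canvas, including the trailing newline
--     canvas = bytearray(b"." * (L * W))
--     canvas[L::W] = b"\n" * L                              # newline column
--     canvas[0::W] = b"|" * L                               # left edge
--     canvas[m::W] = b"|" * L                               # centre vertical
--     canvas[L - 1::W] = b"|" * L                           # right edge
--     canvas[m * W + 1:m * W + L - 1] = b"-" * (L - 2)      # centre horizontal stroke
--     canvas[m * W + m] = ord("+")                          # centre of the cross
--     canvas[0:L] = b"-" * L                                # top border
--     canvas[(L - 1) * W:(L - 1) * W + L] = b"-" * L        # bottom border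
--     return canvas[:-1].decode()
-- ===== Notes on version B (the rewrite author's own statement) =====
-- stated objective: alternative
-- what changed: Replaces A's index loop accumulating repeated template lines by raster painting: a flat mutable canvas of '.' cells on which the newline column, the vertical bars, the centre stroke, the centre '+' and the two borders are painted by strided/contiguous slice assignment.
import Mathlib
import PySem

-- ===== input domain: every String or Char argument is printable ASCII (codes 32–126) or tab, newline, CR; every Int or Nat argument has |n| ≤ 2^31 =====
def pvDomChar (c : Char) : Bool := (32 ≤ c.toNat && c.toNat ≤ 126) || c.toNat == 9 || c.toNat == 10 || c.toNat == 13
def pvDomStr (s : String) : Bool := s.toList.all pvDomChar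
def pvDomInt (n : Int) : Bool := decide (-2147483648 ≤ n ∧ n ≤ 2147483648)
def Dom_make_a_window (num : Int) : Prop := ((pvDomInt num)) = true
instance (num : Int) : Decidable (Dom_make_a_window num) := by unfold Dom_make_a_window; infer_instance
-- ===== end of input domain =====

-- B raster-paints the window onto a flat mutable canvas of '.' cells (strided and
-- contiguous slice assignments) instead of A's index loop accumulating repeated
-- template lines (objective: alternative).

-- ===== PORT A =====
-- literal transliteration of A's loop; strings handled as List Char, '*' is PySem.List.pyRepeat
def make_a_window (num : Int) : String :=
  let output : List Char :=
    (PySem.List.pyRange 0 5 1).foldl (fun (output : List Char) (i : Int) =>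
      let (edge, middle, ty, n) :=
        if i = 0 ∨ i = 4 then (('-' : Char), ('-' : Char), ('-' : Char), (1 : Int))
        else if i = 2 then ('|', '+', '-', 1)
        else ('|', '|', '.', num)
      output ++ PySem.List.pyRepeat
        ([edge] ++ PySem.List.pyRepeat [ty] num ++ [middle] ++ PySem.List.pyRepeat [ty] num
          ++ [edge] ++ ['\n']) n) []
  String.ofList (PySem.List.slice output none (some (-1)))   -- output[:-1]

-- ===== PORT B =====
-- Source B helpers: slice assignments on the flat canvas.
-- canvas[s::step] = v*len — strided assignment; exact for 0 ≤ s < step, the only way Source B uses it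
def pvStride (xs : List Char) (s step : Int) (v : Char) : List Char :=
  xs.mapIdx (fun i x => if (i : Int) % step = s then v else x)
-- canvas[a:b] = v*(b-a) — contiguous assignment; exact for 0 ≤ a ≤ b ≤ len, the only way Source B uses it
def pvSeg (xs : List Char) (a b : Int) (v : Char) : List Char :=
  xs.mapIdx (fun i x => if a ≤ (i : Int) ∧ (i : Int) < b then v else x)
-- canvas[j] = v — single-cell assignment; exact for 0 ≤ j < len, the only way Source B uses it
def pvSet (xs : List Char) (j : Int) (v : Char) : List Char :=
  xs.mapIdx (fun i x => if (i : Int) = j then v else x)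

-- literal transliteration of Source B: paint the window onto a flat '.' canvas
def make_a_window_alt (num : Int) : String :=
  let k : Int := max num 0
  let L : Int := 2 * k + 3
  let m : Int := k + 1
  let W : Int := L + 1
  let canvas := List.replicate (L * W).toNat '.'
  let canvas := pvStride canvas L W '\n'
  let canvas := pvStride canvas 0 W '|'
  let canvas := pvStride canvas m W '|'
  let canvas := pvStride canvas (L - 1) W '|'
  let canvas := pvSeg canvas (m * W + 1) (m * W + L - 1) '-'
  let canvas := pvSet canvas (m * W + m) '+'
  let canvas := pvSeg canvas 0 L '-'
  let canvas := pvSeg canvas ((L - 1) * W) ((L - 1) * W + L) '-'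
  String.ofList canvas.dropLast

-- ===== PRECONDITION & SPEC =====
def Spec_make_a_window (num : Int) (out : String) : Prop := out = make_a_window_alt num
instance (num : Int) (out : String) : Decidable (Spec_make_a_window num out) := by unfold Spec_make_a_window; infer_instance

-- ===== CLAIM (what is proved, stated in full; the proofs are below) =====
def Claim_equal_make_a_window : Prop := ∀ (num : Int), Dom_make_a_window num → Spec_make_a_window num (make_a_window num)

-- ===== LEMMAS AND PROOFS =====

-- the three line shapes (proof-only abbreviations)
def pvBorder (n : Nat) : List Char :=
  '-' :: (List.replicate n '-' ++ '-' :: (List.replicate n '-' ++ ['-']))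
def pvSide (n : Nat) : List Char :=
  '|' :: (List.replicate n '.' ++ '|' :: (List.replicate n '.' ++ ['|']))
def pvMid (n : Nat) : List Char :=
  '|' :: (List.replicate n '-' ++ '+' :: (List.replicate n '-' ++ ['|']))

-- the painted canvas as a function of the flat index (paints in reverse order, later paints outermost)
def pvG (n : Nat) (i : Int) : Char :=
  if (2*(n:Int)+3-1) * (2*(n:Int)+3+1) ≤ i ∧ i < (2*(n:Int)+3-1) * (2*(n:Int)+3+1) + (2*(n:Int)+3) then '-'
  else if 0 ≤ i ∧ i < 2*(n:Int)+3 then '-'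
  else if i = ((n:Int)+1) * (2*(n:Int)+3+1) + ((n:Int)+1) then '+'
  else if ((n:Int)+1) * (2*(n:Int)+3+1) + 1 ≤ i ∧ i < ((n:Int)+1) * (2*(n:Int)+3+1) + (2*(n:Int)+3) - 1 then '-'
  else if i % (2*(n:Int)+3+1) = 2*(n:Int)+3 - 1 then '|'
  else if i % (2*(n:Int)+3+1) = (n:Int)+1 then '|'
  else if i % (2*(n:Int)+3+1) = 0 then '|'
  else if i % (2*(n:Int)+3+1) = 2*(n:Int)+3 then '\n'
  else '.'

-- the character the window holds at row r, column c (columns 0 … 2n+2)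
def pvNatCh (n r c : Nat) : Char :=
  if r = 0 ∨ r = 2*n+2 then '-'
  else if c = 0 ∨ c = 2*n+2 then '|'
  else if r = n+1 then (if c = n+1 then '+' else '-')
  else if c = n+1 then '|' else '.'

-- the canvas chain of B's port is the pointwise function pvG over the flat index range
theorem alt_as_map (num : Int) :
    make_a_window_alt num
      = String.ofList (((List.range ((2*num.toNat+3)*(2*num.toNat+4))).map
          (fun (i : Nat) => pvG num.toNat (i : Int))).dropLast) := by
  set n := num.toNat with hn
  have hk : max num 0 = (n : Int) := by omega
  unfold make_a_window_alt
  simp only [hk]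
  refine congrArg String.ofList (congrArg List.dropLast ?_)
  have hN : ((2*(n:Int)+3) * ((2*(n:Int)+3)+1)).toNat = (2*n+3)*(2*n+4) := by
    rw [show (2*(n:Int)+3) * ((2*(n:Int)+3)+1) = (((2*n+3)*(2*n+4) : Nat) : Int) by push_cast; ring,
      Int.toNat_natCast]
  apply List.ext_getElem
  · simp [pvStride, pvSeg, pvSet, hN]
  · intro i h1 h2
    simp only [pvStride, pvSeg, pvSet, List.getElem_mapIdx, List.getElem_replicate,
      List.getElem_map, List.getElem_range, pvG]

-- division-algorithm uniqueness: a segment inside one canvas row pins down the row index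
theorem row_seg (Wd x y ri r c : Nat) (hc : c < Wd) (hy : y ≤ Wd) :
    (ri*Wd + x ≤ r*Wd + c ∧ r*Wd + c < ri*Wd + y) ↔ (r = ri ∧ x ≤ c ∧ c < y) := by
  constructor
  · rintro ⟨h1, h2⟩
    have hle : r ≤ ri := by
      by_contra hgt; push_neg at hgt
      have h3 : (ri+1)*Wd ≤ r*Wd := Nat.mul_le_mul_right _ hgt
      rw [Nat.add_mul, Nat.one_mul] at h3
      linarith
    have hge : ri ≤ r := by
      by_contra hgt; push_neg at hgt
      have h3 : (r+1)*Wd ≤ ri*Wd := Nat.mul_le_mul_right _ hgt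
      rw [Nat.add_mul, Nat.one_mul] at h3
      linarith
    have hr : r = ri := le_antisymm hle hge
    subst hr
    exact ⟨rfl, Nat.le_of_add_le_add_left h1, Nat.lt_of_add_lt_add_left h2⟩
  · rintro ⟨rfl, hx, hyy⟩
    exact ⟨Nat.add_le_add_left hx _, Nat.add_lt_add_left hyy _⟩

-- pvG at 2-D coordinates: the window character, or the newline at column 2n+3
theorem pvG_row (n r c : Nat) (hr : r < 2*n+3) (hc : c < 2*n+4) :
    pvG n ((r*(2*n+4)+c : Nat) : Int) =
      (if c = 2*n+3 then '\n' else pvNatCh n r c) := by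
  have hmod : ((r*(2*n+4)+c : Nat) : Int) % (2*(n:Int)+3+1) = (c:Int) := by
    push_cast
    rw [show (r:Int)*(2*(n:Int)+4)+(c:Int) = (c:Int) + (2*(n:Int)+3+1)*(r:Int) by ring,
      Int.add_mul_emod_self_left]
    exact Int.emod_eq_of_lt (by positivity) (by omega)
  have hbot : ((2*(n:Int)+3-1) * (2*(n:Int)+3+1) ≤ ((r*(2*n+4)+c : Nat) : Int) ∧
      ((r*(2*n+4)+c : Nat) : Int) < (2*(n:Int)+3-1) * (2*(n:Int)+3+1) + (2*(n:Int)+3)) ↔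
      (r = 2*n+2 ∧ c < 2*n+3) := by
    rw [show (2*(n:Int)+3-1) * (2*(n:Int)+3+1) = (((2*n+2)*(2*n+4) : Nat) : Int) by push_cast; ring]
    rw [show (((2*n+2)*(2*n+4) : Nat) : Int) + (2*(n:Int)+3)
        = (((2*n+2)*(2*n+4)+(2*n+3) : Nat) : Int) by push_cast; ring]
    rw [Int.ofNat_le, Int.ofNat_lt]
    have h := row_seg (2*n+4) 0 (2*n+3) (2*n+2) r c hc (by omega)
    rw [Nat.add_zero] at h
    rw [h]
    omega
  have htop : ((0:Int) ≤ ((r*(2*n+4)+c : Nat) : Int) ∧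
      ((r*(2*n+4)+c : Nat) : Int) < 2*(n:Int)+3) ↔ (r = 0 ∧ c < 2*n+3) := by
    rw [show (2*(n:Int)+3) = (((2*n+3) : Nat) : Int) by push_cast; ring]
    have h := row_seg (2*n+4) 0 (2*n+3) 0 r c hc (by omega)
    rw [Nat.zero_mul, Nat.zero_add, Nat.zero_add] at h
    constructor
    · rintro ⟨_, h2⟩
      have := h.mp ⟨Nat.zero_le _, by exact_mod_cast h2⟩
      exact ⟨this.1, this.2.2⟩
    · rintro ⟨rfl, hcc⟩
      refine ⟨by positivity, by exact_mod_cast (h.mpr ⟨rfl, Nat.zero_le _, hcc⟩).2⟩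
  have hcen : (((r*(2*n+4)+c : Nat) : Int) = ((n:Int)+1) * (2*(n:Int)+3+1) + ((n:Int)+1)) ↔
      (r = n+1 ∧ c = n+1) := by
    rw [show ((n:Int)+1) * (2*(n:Int)+3+1) + ((n:Int)+1)
        = (((n+1)*(2*n+4)+(n+1) : Nat) : Int) by push_cast; ring]
    rw [Int.natCast_inj]
    have h := row_seg (2*n+4) (n+1) (n+2) (n+1) r c hc (by omega)
    constructor
    · intro he
      have hb := h.mp ⟨le_of_eq he.symm, by rw [he]; exact Nat.add_lt_add_left (by omega) _⟩
      exact ⟨hb.1, by omega⟩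
    · rintro ⟨rfl, rfl⟩; rfl
  have hstr : (((n:Int)+1) * (2*(n:Int)+3+1) + 1 ≤ ((r*(2*n+4)+c : Nat) : Int) ∧
      ((r*(2*n+4)+c : Nat) : Int) < ((n:Int)+1) * (2*(n:Int)+3+1) + (2*(n:Int)+3) - 1) ↔
      (r = n+1 ∧ 1 ≤ c ∧ c < 2*n+2) := by
    rw [show ((n:Int)+1) * (2*(n:Int)+3+1) + 1 = (((n+1)*(2*n+4)+1 : Nat) : Int) by push_cast; ring]
    rw [show ((n:Int)+1) * (2*(n:Int)+3+1) + (2*(n:Int)+3) - 1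
        = (((n+1)*(2*n+4)+(2*n+2) : Nat) : Int) by push_cast; ring]
    rw [Int.ofNat_le, Int.ofNat_lt]
    exact row_seg (2*n+4) 1 (2*n+2) (n+1) r c hc (by omega)
  have hm1 : (((c:Nat):Int) = 2*(n:Int)+3-1) ↔ c = 2*n+2 := by omega
  have hm2 : (((c:Nat):Int) = (n:Int)+1) ↔ c = n+1 := by omega
  have hm3 : (((c:Nat):Int) = 0) ↔ c = 0 := by omega
  have hm4 : (((c:Nat):Int) = 2*(n:Int)+3) ↔ c = 2*n+3 := by omega
  simp only [pvG, hmod, hbot, htop, hcen, hstr, hm1, hm2, hm3, hm4, pvNatCh]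
  split_ifs <;> try rfl
  all_goals exfalso
  all_goals omega

-- a map over range that is pointwise constant is a replicate
theorem map_range_const {α : Type} (n : Nat) (g : Nat → α) (c : α)
    (h : ∀ i, i < n → g i = c) : (List.range n).map g = List.replicate n c := by
  refine List.eq_replicate_iff.mpr ⟨by simp, ?_⟩
  intro x hx
  obtain ⟨i, hi, rfl⟩ := List.mem_map.mp hx
  exact h i (List.mem_range.mp hi)

-- a map over range (2n+3) with window-shaped values is the window list
theorem map_range_window {α : Type} (n : Nat) (f : Nat → α) (a b c : α)
    (h0 : f 0 = a) (hm : f (n+1) = b) (hl : f (2*n+2) = a)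
    (hL : ∀ i, i < n → f (i+1) = c) (hR : ∀ i, i < n → f (n+2+i) = c) :
    (List.range (2*n+3)).map f
      = a :: (List.replicate n c ++ b :: (List.replicate n c ++ [a])) := by
  have e : 2*n+3 = 1+n+1+n+1 := by omega
  rw [e, List.range_add, List.range_add, List.range_add, List.range_add]
  simp only [List.map_append, List.map_map, List.range_one, List.map_cons, List.map_nil,
    Function.comp_def]
  rw [map_range_const n _ c (by intro i hi; simpa [Nat.add_comm] using hL i hi),
      map_range_const n _ c (by intro i hi; simpa [show 1+n+1+i = n+2+i by omega] using hR i hi)]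
  rw [show 1+n+0 = n+1 by omega, show 1+n+1+n+0 = 2*n+2 by omega, h0, hm, hl]
  simp

-- a map over a flat index range of size Lr*Wd is the flatten of its Lr rows of width Wd
theorem flatten_grid {α : Type} (Lr Wd : Nat) (G : Nat → α) :
    (List.range (Lr*Wd)).map G
      = ((List.range Lr).map (fun r => (List.range Wd).map (fun c => G (r*Wd+c)))).flatten := by
  induction Lr with
  | zero => simp
  | succ l ih =>
    rw [Nat.succ_mul, List.range_add, List.map_append, ih, List.range_succ, List.map_append]
    simp [List.map_map, Function.comp_def]

-- every line of A's output ends in a newline; dropping the final one is exactly a join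
theorem dropLast_flatten_map_append (s : Char) (lines : List (List Char)) (h : lines ≠ []) :
    ((lines.map (· ++ [s])).flatten).dropLast = List.intercalate [s] lines := by
  induction lines with
  | nil => simp at h
  | cons l rest ih =>
    cases rest with
    | nil => simp [List.intercalate]
    | cons r rs =>
      have hne : (((r :: rs).map (· ++ [s])).flatten) ≠ [] := by simp
      simp only [List.map_cons, List.flatten_cons] at hne ⊢
      rw [List.append_assoc, List.dropLast_append_of_ne_nil (by simp),
        List.dropLast_append_of_ne_nil hne]
      have ih2 := ih (by simp)
      simp only [List.map_cons, List.flatten_cons] at ih2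
      rw [ih2]
      simp [List.intercalate, List.intersperse]

-- A's concatenation of newline-terminated lines, minus the last newline, is the join
theorem window_eq (b s m : List Char) (k : Nat) :
    ((b ++ ['\n']) ++ (List.replicate k (s ++ ['\n'])).flatten ++ (m ++ ['\n'])
      ++ (List.replicate k (s ++ ['\n'])).flatten ++ (b ++ ['\n'])).dropLast
    = List.intercalate ['\n'] ([b] ++ List.replicate k s ++ [m] ++ List.replicate k s ++ [b]) := by
  have hmap : ((([b] ++ List.replicate k s ++ [m] ++ List.replicate k s ++ [b]).map (· ++ ['\n'])).flatten)
      = (b ++ ['\n']) ++ (List.replicate k (s ++ ['\n'])).flatten ++ (m ++ ['\n'])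
        ++ (List.replicate k (s ++ ['\n'])).flatten ++ (b ++ ['\n']) := by
    simp [List.map_replicate, List.append_assoc]
  rw [← hmap, dropLast_flatten_map_append _ _ (by simp)]

-- a canvas row is the corresponding window line plus its newline
theorem rowlist (n r : Nat) (hr : r < 2*n+3) :
    (List.range (2*n+4)).map (fun (c : Nat) => pvG n ((r*(2*n+4)+c : Nat) : Int))
      = (List.range (2*n+3)).map (pvNatCh n r) ++ ['\n'] := by
  rw [show 2*n+4 = (2*n+3)+1 by omega, List.range_succ, List.map_append, List.map_singleton]
  rw [pvG_row n r (2*n+3) hr (by omega), if_pos rfl]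
  refine congrArg (· ++ ['\n']) (List.map_congr_left ?_)
  intro c hcmem
  have hc := List.mem_range.mp hcmem
  rw [pvG_row n r c hr (by omega), if_neg (by omega)]

-- the three line shapes, as rows of pvNatCh
theorem row_border (n r : Nat) (hr : r = 0 ∨ r = 2*n+2) :
    (List.range (2*n+3)).map (pvNatCh n r) = pvBorder n := by
  refine map_range_window n _ '-' '-' '-' ?_ ?_ ?_ ?_ ?_ <;>
    (try intro i hi) <;> simp only [pvNatCh] <;> split_ifs <;> try rfl
  all_goals exfalso
  all_goals try simp only [false_or, true_or, or_false, or_true, not_true, not_false_iff] at *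
  all_goals try exact ‹False›
  all_goals omega

theorem row_mid (n : Nat) :
    (List.range (2*n+3)).map (pvNatCh n (n+1)) = pvMid n := by
  refine map_range_window n _ '|' '+' '-' ?_ ?_ ?_ ?_ ?_ <;> (try intro i hi) <;>
    simp only [pvNatCh] <;> split_ifs <;> try rfl
  all_goals exfalso
  all_goals try simp only [false_or, true_or, or_false, or_true, not_true, not_false_iff] at *
  all_goals try exact ‹False›
  all_goals omega

theorem row_side (n r : Nat) (h1 : 1 ≤ r) (h2 : r ≤ 2*n+1) (h3 : r ≠ n+1) :
    (List.range (2*n+3)).map (pvNatCh n r) = pvSide n := by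
  refine map_range_window n _ '|' '|' '.' ?_ ?_ ?_ ?_ ?_ <;> (try intro i hi) <;>
    simp only [pvNatCh] <;> split_ifs <;> try rfl
  all_goals exfalso
  all_goals try simp only [false_or, true_or, or_false, or_true, not_true, not_false_iff] at *
  all_goals try exact ‹False›
  all_goals omega

-- B's painted canvas equals the intercalation of the window line list
theorem alt_eq (num : Int) :
    make_a_window_alt num
      = String.ofList (List.intercalate ['\n']
          (pvBorder num.toNat :: (List.replicate num.toNat (pvSide num.toNat)
            ++ pvMid num.toNat :: (List.replicate num.toNat (pvSide num.toNat)
            ++ [pvBorder num.toNat])))) := by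
  set n := num.toNat with hn
  rw [alt_as_map]
  refine congrArg String.ofList ?_
  rw [flatten_grid (2*n+3) (2*n+4) (fun (i : Nat) => pvG n (i : Int))]
  have hrows : (List.range (2*n+3)).map
      (fun r => (List.range (2*n+4)).map (fun (c : Nat) => pvG n ((r*(2*n+4)+c : Nat) : Int)))
      = (pvBorder n ++ ['\n']) :: (List.replicate n (pvSide n ++ ['\n'])
          ++ (pvMid n ++ ['\n']) :: (List.replicate n (pvSide n ++ ['\n'])
          ++ [pvBorder n ++ ['\n']])) := by
    refine map_range_window n _ _ _ _ ?_ ?_ ?_ ?_ ?_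
    · rw [rowlist n 0 (by omega), row_border n 0 (Or.inl rfl)]
    · rw [rowlist n (n+1) (by omega), row_mid n]
    · rw [rowlist n (2*n+2) (by omega), row_border n (2*n+2) (Or.inr rfl)]
    · intro i hi; rw [rowlist n (i+1) (by omega), row_side n (i+1) (by omega) (by omega) (by omega)]
    · intro i hi; rw [rowlist n (n+2+i) (by omega), row_side n (n+2+i) (by omega) (by omega) (by omega)]
  rw [hrows]
  have hmap : (pvBorder n ++ ['\n']) :: (List.replicate n (pvSide n ++ ['\n'])
        ++ (pvMid n ++ ['\n']) :: (List.replicate n (pvSide n ++ ['\n'])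
        ++ [pvBorder n ++ ['\n']]))
      = ((pvBorder n :: (List.replicate n (pvSide n)
          ++ pvMid n :: (List.replicate n (pvSide n) ++ [pvBorder n]))).map (· ++ ['\n'])) := by
    simp [List.map_replicate]
  rw [hmap, dropLast_flatten_map_append _ _ (by simp)]

-- ===== VERDICT (by name: the statement is the Claim_ definition above) =====
theorem make_a_window_spec : Claim_equal_make_a_window := by
  intro num _
  unfold Spec_make_a_window
  rw [alt_eq]
  unfold make_a_window
  have hrange : PySem.List.pyRange 0 5 1 = [0, 1, 2, 3, 4] := by decide
  rw [hrange]
  simp only [List.foldl_cons, List.foldl_nil]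
  norm_num
  rw [PySem.List.slice_to_neg_one]
  refine congrArg String.ofList ?_
  have key := window_eq (pvBorder num.toNat) (pvSide num.toNat) (pvMid num.toNat) num.toNat
  simp only [pvBorder, pvSide, pvMid, PySem.List.pyRepeat] at *
  simpa [List.append_assoc] using key
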